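-- pv_equiv track=rewrite | github.com/zappyfish/pi-remote | scripts/vis.py | get_up_to
-- ===== SOURCE A (Python) =====
-- def get_up_to(max_x, x, y):
--     sub_x = []
--     sub_y = []
--     for i in range(len(x)):
--         if x[i] > max_x:
--             break
--         sub_x.append(x[i])
--         sub_y.append(y[i])
--
--     return sub_x, sub_y
-- ===== SOURCE B (Python) =====
-- def get_up_to(max_x, x, y):
--     k = next((i for i, v in enumerate(x) if v > max_x), len(x))
--     return x[:k], y[:k]
-- ===== Notes on version B (the rewrite author's own statement) =====
-- stated objective: simpler
-- what changed: B first locates the cutoff index k (first element of x exceeding max_x) and returns the slices x[:k], y[:k], instead of growing two accumulator lists element by element with a break.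
import Mathlib
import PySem

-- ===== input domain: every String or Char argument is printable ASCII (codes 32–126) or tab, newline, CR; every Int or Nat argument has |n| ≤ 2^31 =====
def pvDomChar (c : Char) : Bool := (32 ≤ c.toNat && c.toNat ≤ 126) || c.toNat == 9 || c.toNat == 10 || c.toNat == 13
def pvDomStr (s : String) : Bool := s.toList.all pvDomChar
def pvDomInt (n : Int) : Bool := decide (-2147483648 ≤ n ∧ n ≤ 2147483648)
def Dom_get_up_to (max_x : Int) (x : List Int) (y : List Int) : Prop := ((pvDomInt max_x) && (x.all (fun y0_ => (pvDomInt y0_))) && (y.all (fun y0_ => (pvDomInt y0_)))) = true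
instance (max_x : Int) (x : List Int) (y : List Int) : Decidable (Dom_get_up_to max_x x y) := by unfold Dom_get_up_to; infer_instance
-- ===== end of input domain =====

-- B computes the cutoff index first and slices, instead of A's two growing accumulator lists; objective: simpler.
-- Equivalence is about the return value only (neither version mutates its arguments).

-- ===== PORT A =====
-- the for-i-in-range loop with break, as index recursion over the same state (sub_x, sub_y);
-- y[i] is ported with PySem.List.pyGetD: Pre_ guarantees every accessed index is in range (Python would raise IndexError otherwise)
def get_up_to_go (max_x : Int) (x : List Int) (y : List Int) (i : Nat)
    (sub_x : List Int) (sub_y : List Int) : List Int × List Int :=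
  if h : i < x.length then
    if max_x < x[i] then (sub_x, sub_y)
    else get_up_to_go max_x x y (i + 1) (sub_x ++ [x[i]]) (sub_y ++ [PySem.List.pyGetD y (i : Int) 0])
  else (sub_x, sub_y)
termination_by x.length - i

def get_up_to (max_x : Int) (x : List Int) (y : List Int) : List Int × List Int :=
  get_up_to_go max_x x y 0 [] []

-- ===== PORT B =====
def get_up_to_alt (max_x : Int) (x : List Int) (y : List Int) : List Int × List Int :=
  let k := x.findIdx (fun v => max_x < v)
  (x.take k, y.take k)

-- ===== PRECONDITION & SPEC =====
-- A raises IndexError when y is shorter than the accepted prefix of x (it reads y[i] for every accepted i); exactly those inputs are excluded.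
def Pre_get_up_to (max_x : Int) (x : List Int) (y : List Int) : Prop :=
  x.findIdx (fun v => max_x < v) ≤ y.length
instance (max_x : Int) (x : List Int) (y : List Int) : Decidable (Pre_get_up_to max_x x y) := by
  unfold Pre_get_up_to; infer_instance

def pvWitness_get_up_to : Int × List Int × List Int := (0, [-1, 5], [7])

def Spec_get_up_to (max_x : Int) (x : List Int) (y : List Int) (out : List Int × List Int) : Prop := out = get_up_to_alt max_x x y
instance (max_x : Int) (x : List Int) (y : List Int) (out : List Int × List Int) : Decidable (Spec_get_up_to max_x x y out) := by unfold Spec_get_up_to; infer_instance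

-- ===== CLAIM (what is proved, stated in full; the proofs are below) =====
def Claim_equal_get_up_to : Prop := ∀ (max_x : Int) (x : List Int) (y : List Int), Dom_get_up_to max_x x y → Pre_get_up_to max_x x y → Spec_get_up_to max_x x y (get_up_to max_x x y)

-- ===== LEMMAS AND PROOFS =====

-- ===== VERDICT (by name: the statement is the Claim_ definition above) =====
-- invariant of A's loop: from index i (inside the accepted prefix) it appends exactly
-- the rest of the accepted prefix of x and of y
theorem get_up_to_go_eq (max_x : Int) (x y : List Int) (i : Nat)
    (sub_x sub_y : List Int)
    (hi : i ≤ x.findIdx (fun v => max_x < v))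
    (hy : x.findIdx (fun v => max_x < v) ≤ y.length) :
    get_up_to_go max_x x y i sub_x sub_y =
      (sub_x ++ (x.take (x.findIdx (fun v => max_x < v))).drop i,
       sub_y ++ (y.take (x.findIdx (fun v => max_x < v))).drop i) := by
  have hKlen : x.findIdx (fun v => decide (max_x < v)) ≤ x.length := List.findIdx_le_length
  rw [get_up_to_go]
  by_cases hlt : i < x.length
  · rw [dif_pos hlt]
    by_cases hbig : max_x < x[i]
    · -- the break branch: i must be exactly the cutoff
      have hKi : x.findIdx (fun v => decide (max_x < v)) ≤ i := by
        by_contra hc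
        have := List.not_of_lt_findIdx (p := fun v => decide (max_x < v)) (xs := x)
          (Nat.lt_of_not_le hc)
        simp only [decide_eq_false_iff_not, not_lt] at this
        omega
      have hKi' : x.findIdx (fun v => decide (max_x < v)) = i := Nat.le_antisymm hKi hi
      rw [if_pos hbig]
      rw [List.drop_eq_nil_of_le (by simp [hKi']),
          List.drop_eq_nil_of_le (by simp [hKi'])]
      simp
    · -- the accept branch
      have hiK : i < x.findIdx (fun v => decide (max_x < v)) := by
        rcases Nat.eq_or_lt_of_le hi with h | h
        · exfalso
          have hw : x.findIdx (fun v => decide (max_x < v)) < x.length := by omega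
          have := List.findIdx_getElem (p := fun v => decide (max_x < v)) (xs := x) (w := hw)
          simp only [decide_eq_true_eq] at this
          simp only [← h] at this
          exact hbig this
        · exact h
      rw [if_neg hbig]
      rw [get_up_to_go_eq max_x x y (i + 1) _ _ hiK hy]
      have hx : (x.take (x.findIdx (fun v => decide (max_x < v)))).drop i =
          x[i] :: (x.take (x.findIdx (fun v => decide (max_x < v)))).drop (i + 1) := by
        rw [List.drop_eq_getElem_cons (by simp only [List.length_take]; omega)]
        congr 1
        exact List.getElem_take
      have hyi : i < y.length := by omega
      have hyy : (y.take (x.findIdx (fun v => decide (max_x < v)))).drop i =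
          PySem.List.pyGetD y (i : Int) 0 :: (y.take (x.findIdx (fun v => decide (max_x < v)))).drop (i + 1) := by
        rw [List.drop_eq_getElem_cons (by simp only [List.length_take]; omega)]
        congr 1
        rw [PySem.List.pyGetD_natCast, List.getElem_take]
        exact (List.getD_eq_getElem y 0 hyi).symm
      rw [hx, hyy]
      simp
  · rw [dif_neg hlt]
    have hKi' : x.findIdx (fun v => decide (max_x < v)) = i := Nat.le_antisymm (by omega) hi
    rw [List.drop_eq_nil_of_le (by simp [hKi']),
        List.drop_eq_nil_of_le (by simp [hKi'])]
    simp
termination_by x.length - i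

theorem get_up_to_spec : Claim_equal_get_up_to := by
  intro max_x x y _ hpre
  unfold Spec_get_up_to get_up_to get_up_to_alt
  have h := get_up_to_go_eq max_x x y 0 [] [] (Nat.zero_le _) hpre
  simpa using h
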